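-- pv_equiv track=rewrite | github.com/hraf7g/browser-use | src/crawler/sources/dubai_esupply_normalizer.py | _is_high_confidence_tender_ref
-- ===== SOURCE A (Python) =====
-- KNOWN_REFERENCE_PREFIXES = (
--     "REQ",
--     "RFQ",
--     "RFP",
--     "RFT",
--     "SOQ",
--     "IPR",
--     "PR",
--     "PO",
--     "WO",
--     "W.O",
--     "T",
--     "T#",
--     "NJI",
-- )
--
-- def _is_high_confidence_tender_ref(value: str) -> bool:
--     """
--     Return whether a Dubai eSupply reference candidate is safe to persist.
--
--     Heuristics are intentionally conservative:
--         - must contain at least 4 digits overall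
--         - must either start with digits, start with a known procurement prefix,
--           or contain structural separators commonly used in references
--
--     This rejects generic department/category labels such as:
--         - Med.Equip
--         - AJCH
--         - Medical Consumable Items
--     """
--     cleaned = value.strip()
--     if not cleaned:
--         return False
--
--     digit_count = sum(1 for character in cleaned if character.isdigit())
--     if digit_count < 4:
--         return False
--
--     if cleaned[0].isdigit():
--         return True
--
--     uppercase = cleaned.upper()
--     for prefix in KNOWN_REFERENCE_PREFIXES:
--         if (
--             uppercase == prefix
--             or uppercase.startswith(f"{prefix} ")
--             or uppercase.startswith(f"{prefix}-")
--             or uppercase.startswith(f"{prefix}/")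
--             or uppercase.startswith(f"{prefix}#")
--             or uppercase.startswith(f"{prefix}:")
--         ):
--             return True
--
--     return any(separator in cleaned for separator in ("/", "-", "#"))
-- ===== SOURCE B (Python) =====
-- KNOWN_REFERENCE_PREFIXES = (
--     "REQ",
--     "RFQ",
--     "RFP",
--     "RFT",
--     "SOQ",
--     "IPR",
--     "PR",
--     "PO",
--     "WO",
--     "W.O",
--     "T",
--     "T#",
--     "NJI",
-- )
--
-- _PREFIX_SET = frozenset(KNOWN_REFERENCE_PREFIXES)
-- _SEPARATORS = " -/#:"
--
--
-- def _is_high_confidence_tender_ref(value: str) -> bool: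
--     cleaned = value.strip()
--     if sum(character.isdigit() for character in cleaned) < 4:
--         return False
--     if cleaned[0].isdigit():
--         return True
--     uppercase = cleaned.upper()
--     token = uppercase
--     for index, character in enumerate(uppercase):
--         if character in _SEPARATORS:
--             token = uppercase[:index]
--             break
--     if token in _PREFIX_SET:
--         return True
--     return any(separator in cleaned for separator in "/-#")
-- ===== Notes on version B (the rewrite author's own statement) =====
-- stated objective: simpler
-- what changed: Replaced the 13-prefix x 6-pattern startswith scan by cutting the leading token at the first separator character (space, hyphen, slash, hash or colon) and testing that single token against a frozenset of known prefixes.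
import Mathlib
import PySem

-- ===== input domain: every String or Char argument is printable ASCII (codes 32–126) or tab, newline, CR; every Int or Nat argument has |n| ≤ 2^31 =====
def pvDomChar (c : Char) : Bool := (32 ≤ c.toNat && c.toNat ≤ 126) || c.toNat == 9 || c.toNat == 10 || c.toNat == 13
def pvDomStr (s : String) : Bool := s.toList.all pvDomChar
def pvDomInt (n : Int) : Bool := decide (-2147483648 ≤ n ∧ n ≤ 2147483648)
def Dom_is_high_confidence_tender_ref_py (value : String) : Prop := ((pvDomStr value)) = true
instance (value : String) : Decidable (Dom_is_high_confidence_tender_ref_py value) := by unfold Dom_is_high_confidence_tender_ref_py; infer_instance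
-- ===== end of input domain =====

-- B replaces the 13-prefix × 6-pattern scan by cutting the leading token at the first separator
-- and one set-membership test (objective: simpler).


-- ===== PORT A =====
-- KNOWN_REFERENCE_PREFIXES (module constant, shared by both ports)
def pvPrefixes : List (List Char) :=
  [['R','E','Q'], ['R','F','Q'], ['R','F','P'], ['R','F','T'], ['S','O','Q'], ['I','P','R'],
   ['P','R'], ['P','O'], ['W','O'], ['W','.','O'], ['T'], ['T','#'], ['N','J','I']]

-- the body of A's prefix loop for one prefix (the six or-ed conditions, in order)
def pvHit (uppercase p : List Char) : Bool :=
  (uppercase == p)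
  || PySem.Chars.startswith uppercase (p ++ [' '])
  || PySem.Chars.startswith uppercase (p ++ ['-'])
  || PySem.Chars.startswith uppercase (p ++ ['/'])
  || PySem.Chars.startswith uppercase (p ++ ['#'])
  || PySem.Chars.startswith uppercase (p ++ [':'])

def is_high_confidence_tender_ref_py (value : String) : Bool :=
  let cleaned := PySem.Chars.strip value.toList
  if cleaned = [] then false
  else if cleaned.countP PySem.Chars.isdigit < 4 then false
  else if PySem.Chars.isdigit (cleaned.headD ' ') then true   -- cleaned ≠ [] here, so headD = cleaned[0]
  else
    let uppercase := PySem.Chars.upper cleaned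
    if pvPrefixes.any (fun p => pvHit uppercase p) then true
    else [['/'], ['-'], ['#']].any (fun sep => PySem.Chars.isIn sep cleaned)

-- ===== PORT B =====
def pvSeps : List Char := [' ', '-', '/', '#', ':']

-- B's token loop: cut at the first separator (break), else keep the whole string
def pvTok : List Char → List Char
  | [] => []
  | c :: cs => if pvSeps.contains c then [] else c :: pvTok cs

def is_high_confidence_tender_ref_py_alt (value : String) : Bool :=
  let cleaned := PySem.Chars.strip value.toList
  if cleaned.countP PySem.Chars.isdigit < 4 then false
  else if PySem.Chars.isdigit (cleaned.headD ' ') then true   -- ≥ 4 digits ⇒ cleaned ≠ []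
  else
    let token := pvTok (PySem.Chars.upper cleaned)
    if pvPrefixes.contains token then true
    else ['/', '-', '#'].any (fun c => PySem.Chars.isIn [c] cleaned)

-- ===== PRECONDITION & SPEC =====
def Spec_is_high_confidence_tender_ref_py (value : String) (out : Bool) : Prop := out = is_high_confidence_tender_ref_py_alt value
instance (value : String) (out : Bool) : Decidable (Spec_is_high_confidence_tender_ref_py value out) := by unfold Spec_is_high_confidence_tender_ref_py; infer_instance

-- ===== CLAIM (what is proved, stated in full; the proofs are below) =====
def Claim_equal_is_high_confidence_tender_ref_py : Prop := ∀ (value : String), Dom_is_high_confidence_tender_ref_py value → Spec_is_high_confidence_tender_ref_py value (is_high_confidence_tender_ref_py value)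

-- ===== LEMMAS AND PROOFS =====

-- pvTok walks through a separator-free block
lemma pvTok_append_sepfree (p r : List Char) (hp : ∀ c ∈ p, pvSeps.contains c = false) :
    pvTok (p ++ r) = p ++ pvTok r := by
  induction p with
  | nil => simp
  | cons c cs ih =>
      simp only [List.cons_append, pvTok, hp c (by simp)]
      simp only [Bool.false_eq_true, if_false, List.cons.injEq, true_and]
      exact ih (fun d hd => hp d (by simp [hd]))

-- pvTok stops at a separator
lemma pvTok_cons_sep (c : Char) (r : List Char) (hc : pvSeps.contains c = true) :
    pvTok (c :: r) = [] := by simp only [pvTok, hc, if_true]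

-- u is its token followed by nothing or by a separator
lemma pvTok_decomp (u : List Char) :
    u = pvTok u ∨ ∃ s r, pvSeps.contains s = true ∧ u = pvTok u ++ s :: r := by
  induction u with
  | nil => left; rfl
  | cons c cs ih =>
      by_cases hc : pvSeps.contains c = true
      · right; exact ⟨c, cs, hc, by simp [pvTok_cons_sep c cs hc]⟩
      · have hc' : pvSeps.contains c = false := by simpa using hc
        simp only [pvTok, hc', Bool.false_eq_true, if_false]
        rcases ih with h | ⟨s, r, hs, h⟩
        · left; rw [← h]
        · right; exact ⟨s, r, hs, by rw [List.cons_append, ← h]⟩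

-- if the token of u is p, A's six-way test accepts p on u
lemma pvHit_of_tok (u p : List Char) (h : pvTok u = p) : pvHit u p = true := by
  rcases pvTok_decomp u with hu | ⟨s, r, hs, hu⟩
  · have hup : u = p := hu.trans h
    simp [pvHit, hup]
  · rw [h] at hu
    have hpref : ∀ t, u = (p ++ [s]) ++ t → PySem.Chars.startswith u (p ++ [s]) = true := by
      intro t ht
      rw [PySem.Chars.startswith_iff]
      exact ⟨t, ht.symm⟩
    have := hpref r (by simpa using hu)
    have hs' : s = ' ' ∨ s = '-' ∨ s = '/' ∨ s = '#' ∨ s = ':' := by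
      simpa [pvSeps] using hs
    rcases hs' with h' | h' | h' | h' | h' <;> subst h' <;> simp [pvHit, this]

-- token of a string starting with "T#"
lemma pvTok_T_hash (t : List Char) : pvTok ('T' :: '#' :: t) = ['T'] := by
  simp [pvTok, pvSeps]

-- if A's test accepts a separator-free prefix p on u, then the token of u is p
lemma pvTok_of_hit_sepfree (u p : List Char) (h : pvHit u p = true)
    (hp : ∀ c ∈ p, pvSeps.contains c = false) : pvTok u = p := by
  have key : ∀ s t, u = (p ++ [s]) ++ t → pvSeps.contains s = true → pvTok u = p := by
    intro s t hu hs
    rw [hu, List.append_assoc, pvTok_append_sepfree p _ hp, List.singleton_append,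
        pvTok_cons_sep s t hs, List.append_nil]
  simp only [pvHit, Bool.or_eq_true, beq_iff_eq, PySem.Chars.startswith_iff] at h
  rcases h with ((((h | h) | h) | h) | h) | h
  · rw [h]
    have h0 := pvTok_append_sepfree p [] hp
    simpa [pvTok] using h0
  all_goals (obtain ⟨t, ht⟩ := h; exact key _ t ht.symm (by decide))

-- any accepted prefix forces the token to be a known prefix
lemma pvContains_of_hit (u p : List Char) (hp : p ∈ pvPrefixes) (h : pvHit u p = true) :
    pvPrefixes.contains (pvTok u) = true := by
  by_cases hT : p = ['T', '#']
  · -- the one prefix containing a separator: any hit forces u = 'T' :: '#' :: t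
    subst hT
    have : ∃ t, u = 'T' :: '#' :: t := by
      simp only [pvHit, Bool.or_eq_true, beq_iff_eq, PySem.Chars.startswith_iff] at h
      rcases h with ((((h | h) | h) | h) | h) | h
      · exact ⟨[], h⟩
      all_goals (obtain ⟨t, ht⟩ := h; exact ⟨_, ht.symm⟩)
    obtain ⟨t, ht⟩ := this
    rw [ht, pvTok_T_hash]
    decide
  · have hsf : ∀ c ∈ p, pvSeps.contains c = false := by
      have hp13 : p = ['R','E','Q'] ∨ p = ['R','F','Q'] ∨ p = ['R','F','P'] ∨ p = ['R','F','T'] ∨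
          p = ['S','O','Q'] ∨ p = ['I','P','R'] ∨ p = ['P','R'] ∨ p = ['P','O'] ∨ p = ['W','O'] ∨
          p = ['W','.','O'] ∨ p = ['T'] ∨ p = ['T','#'] ∨ p = ['N','J','I'] := by
        simpa [pvPrefixes] using hp
      rcases hp13 with h|h|h|h|h|h|h|h|h|h|h|h|h <;> subst h <;>
        first
          | (intro c hc; fin_cases hc <;> rfl)
          | exact absurd rfl hT
    rw [pvTok_of_hit_sepfree u p h hsf]
    simp only [List.contains_eq_mem, decide_eq_true_eq]
    exact hp

-- A's prefix loop ≡ B's token membership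
lemma pvAny_eq_contains (u : List Char) :
    pvPrefixes.any (fun p => pvHit u p) = pvPrefixes.contains (pvTok u) := by
  rcases hB : pvPrefixes.contains (pvTok u) with _ | _
  · rw [List.any_eq_false]
    intro p hp hhit
    have contra := pvContains_of_hit u p hp hhit
    rw [hB] at contra
    exact Bool.false_ne_true contra
  · rw [List.any_eq_true]
    refine ⟨pvTok u, ?_, pvHit_of_tok u _ rfl⟩
    simpa using hB

-- the two final separator checks are the same three tests
lemma pvSepcheck_eq (cleaned : List Char) :
    ([['/'], ['-'], ['#']] : List (List Char)).any (fun sep => PySem.Chars.isIn sep cleaned)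
      = (['/', '-', '#'] : List Char).any (fun c => PySem.Chars.isIn [c] cleaned) := by
  simp [List.any]

-- ===== VERDICT (by name: the statement is the Claim_ definition above) =====
theorem is_high_confidence_tender_ref_py_spec : Claim_equal_is_high_confidence_tender_ref_py := by
  intro value _
  unfold Spec_is_high_confidence_tender_ref_py
  unfold is_high_confidence_tender_ref_py is_high_confidence_tender_ref_py_alt
  set cleaned := PySem.Chars.strip value.toList with hc
  by_cases hnil : cleaned = []
  · simp [hnil]
  · simp only [hnil, if_false]
    by_cases hcnt : cleaned.countP PySem.Chars.isdigit < 4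
    · simp [hcnt]
    · simp only [hcnt, if_false]
      by_cases hd : PySem.Chars.isdigit (cleaned.headD ' ') = true
      · simp only [hd, if_true]
      · simp only [Bool.not_eq_true] at hd
        simp only [hd, Bool.false_eq_true, if_false]
        rw [pvAny_eq_contains, pvSepcheck_eq]
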